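-- pv_equiv track=rewrite | github.com/edanielistvan/references | Python/TestPowers/power.py | alsoSixAndFourAndNinePower
-- ===== SOURCE A (Python) =====
-- def alsoSixAndFourAndNinePower(n: int, k: int, s=0) -> int:
--     if k == 0:
--         return 1
--     elif k == 1:
--         return 1
--     else:
--         if k % 9 == 0:
--             return 1 + alsoSixAndFourAndNinePower((n * n * n) ** 2, k // 9, s)
--         if k % 6 == 0:
--             return 1 + alsoSixAndFourAndNinePower((n * n) ** 3, k // 6, s)
--         if k % 4 == 0:
--             return 1 + alsoSixAndFourAndNinePower(n * n * n * n, k // 4, s)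
--         elif k % 3 == 0:
--             return 1 + alsoSixAndFourAndNinePower(n * n * n, k // 3, s)
--         elif k % 2 == 0:
--             return 1 + alsoSixAndFourAndNinePower(n * n, k // 2, s)
--         elif k % 3 == 1 or k % 2 == 1:
--             return 1 + alsoSixAndFourAndNinePower(n, k - 1, s + n)
--         else:
--             return 1 + alsoSixAndFourAndNinePower(n, k - 2, s + n + n)
-- ===== SOURCE B (Python) =====
-- def alsoSixAndFourAndNinePower(n: int, k: int, s=0) -> int:
--     # The result depends only on k: count the reduction steps iteratively,
--     # never touching n or s (no big-number powers are computed).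
--     count = 1
--     while k > 1:
--         count += 1
--         if k % 9 == 0:
--             k //= 9
--         elif k % 6 == 0:
--             k //= 6
--         elif k % 4 == 0:
--             k //= 4
--         elif k % 3 == 0:
--             k //= 3
--         elif k % 2 == 0:
--             k //= 2
--         else:
--             k -= 1
--     return count
-- ===== Notes on version B (the rewrite author's own statement) =====
-- stated objective: faster
-- what changed: B observes that the return value depends only on k and counts the reduction steps with an iterative loop on k alone, never computing the huge powers of n that A builds at every recursive call.
-- outside the precondition, e.g. on alsoSixAndFourAndNinePower(2, -1, 0): A does not finish within the time limit, B returns 1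
import Mathlib
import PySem

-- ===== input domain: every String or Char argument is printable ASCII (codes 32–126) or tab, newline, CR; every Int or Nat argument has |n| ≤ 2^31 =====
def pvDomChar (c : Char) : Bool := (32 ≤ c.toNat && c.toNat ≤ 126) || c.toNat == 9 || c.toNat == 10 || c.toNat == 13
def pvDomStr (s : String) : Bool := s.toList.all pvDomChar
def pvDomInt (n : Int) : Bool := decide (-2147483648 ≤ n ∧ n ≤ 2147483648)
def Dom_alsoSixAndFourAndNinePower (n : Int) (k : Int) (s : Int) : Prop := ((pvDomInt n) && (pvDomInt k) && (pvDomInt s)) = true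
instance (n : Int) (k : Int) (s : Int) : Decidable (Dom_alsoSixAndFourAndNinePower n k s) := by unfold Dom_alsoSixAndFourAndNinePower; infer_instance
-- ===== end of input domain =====

-- B counts the same k-reduction steps with an iterative loop on k alone,
-- never computing the powers of n that A builds at every recursive call (faster: O(1)-size arithmetic per step).

-- ===== PORT A =====
-- Literal transliteration of A's recursion.  The 'k < 0' guard only makes the
-- definition total: Python A never returns on k < 0 (infinite recursion), and
-- Pre_ excludes those inputs.
def alsoSixAndFourAndNinePower (n : Int) (k : Int) (s : Int) : Int :=
  if k = 0 then 1
  else if k = 1 then 1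
  else if k < 0 then 1  -- totality guard, outside Pre_
  else if PySem.Int.mod k 9 = 0 then
    1 + alsoSixAndFourAndNinePower ((n * n * n) ^ 2) (PySem.Int.floordiv k 9) s
  else if PySem.Int.mod k 6 = 0 then
    1 + alsoSixAndFourAndNinePower ((n * n) ^ 3) (PySem.Int.floordiv k 6) s
  else if PySem.Int.mod k 4 = 0 then
    1 + alsoSixAndFourAndNinePower (n * n * n * n) (PySem.Int.floordiv k 4) s
  else if PySem.Int.mod k 3 = 0 then
    1 + alsoSixAndFourAndNinePower (n * n * n) (PySem.Int.floordiv k 3) s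
  else if PySem.Int.mod k 2 = 0 then
    1 + alsoSixAndFourAndNinePower (n * n) (PySem.Int.floordiv k 2) s
  else if PySem.Int.mod k 3 = 1 ∨ PySem.Int.mod k 2 = 1 then
    1 + alsoSixAndFourAndNinePower n (k - 1) (s + n)
  else
    1 + alsoSixAndFourAndNinePower n (k - 2) (s + n + n)
termination_by k.toNat
decreasing_by
  all_goals
    (try simp only [PySem.Int.floordiv_eq_ediv_of_pos (by norm_num : (0:Int) < 9),
      PySem.Int.floordiv_eq_ediv_of_pos (by norm_num : (0:Int) < 6),
      PySem.Int.floordiv_eq_ediv_of_pos (by norm_num : (0:Int) < 4),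
      PySem.Int.floordiv_eq_ediv_of_pos (by norm_num : (0:Int) < 3),
      PySem.Int.floordiv_eq_ediv_of_pos (by norm_num : (0:Int) < 2)]) <;>
  omega

-- ===== PORT B =====
-- Source B's if/elif chain computing the next value of k
def pvNext (k : Int) : Int :=
  if PySem.Int.mod k 9 = 0 then PySem.Int.floordiv k 9
  else if PySem.Int.mod k 6 = 0 then PySem.Int.floordiv k 6
  else if PySem.Int.mod k 4 = 0 then PySem.Int.floordiv k 4
  else if PySem.Int.mod k 3 = 0 then PySem.Int.floordiv k 3
  else if PySem.Int.mod k 2 = 0 then PySem.Int.floordiv k 2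
  else k - 1

-- the measure fact cited by pvStepLoop's decreasing_by
theorem pvNext_lt {k : Int} (h : k > 1) : (pvNext k).toNat < k.toNat := by
  unfold pvNext
  simp only [PySem.Int.floordiv_eq_ediv_of_pos (by norm_num : (0:Int) < 9),
    PySem.Int.floordiv_eq_ediv_of_pos (by norm_num : (0:Int) < 6),
    PySem.Int.floordiv_eq_ediv_of_pos (by norm_num : (0:Int) < 4),
    PySem.Int.floordiv_eq_ediv_of_pos (by norm_num : (0:Int) < 3),
    PySem.Int.floordiv_eq_ediv_of_pos (by norm_num : (0:Int) < 2)]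
  split_ifs <;> omega

-- Source B's while-loop, as a tail-recursive helper carrying (k, count)
def pvStepLoop (k : Int) (count : Int) : Int :=
  if h : k > 1 then
    pvStepLoop (pvNext k) (count + 1)
  else count
termination_by k.toNat
decreasing_by exact pvNext_lt h

def alsoSixAndFourAndNinePower_alt (_n : Int) (k : Int) (_s : Int) : Int :=
  pvStepLoop k 1

-- ===== PRECONDITION & SPEC =====
-- Pre_ excludes k < 0, on which Python A recurses forever (never returns a value).
def Pre_alsoSixAndFourAndNinePower (n : Int) (k : Int) (s : Int) : Prop := 0 ≤ k
instance (n : Int) (k : Int) (s : Int) : Decidable (Pre_alsoSixAndFourAndNinePower n k s) := by unfold Pre_alsoSixAndFourAndNinePower; infer_instance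
def pvWitness_alsoSixAndFourAndNinePower : Int × Int × Int := (3, 100, 0)

def Spec_alsoSixAndFourAndNinePower (n : Int) (k : Int) (s : Int) (out : Int) : Prop := out = alsoSixAndFourAndNinePower_alt n k s
instance (n : Int) (k : Int) (s : Int) (out : Int) : Decidable (Spec_alsoSixAndFourAndNinePower n k s out) := by unfold Spec_alsoSixAndFourAndNinePower; infer_instance

-- ===== CLAIM (what is proved, stated in full; the proofs are below) =====
def Claim_equal_alsoSixAndFourAndNinePower : Prop := ∀ (n : Int) (k : Int) (s : Int), Dom_alsoSixAndFourAndNinePower n k s → Pre_alsoSixAndFourAndNinePower n k s → Spec_alsoSixAndFourAndNinePower n k s (alsoSixAndFourAndNinePower n k s)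

-- ===== LEMMAS AND PROOFS =====

-- the loop commutes with incrementing the counter
theorem pvStepLoop_succ (k c : Int) : pvStepLoop k (c + 1) = 1 + pvStepLoop k c := by
  generalize hm : k.toNat = m
  induction m using Nat.strong_induction_on generalizing k c with
  | _ m ih =>
    conv_lhs => rw [pvStepLoop]
    conv_rhs => rw [pvStepLoop]
    by_cases h : k > 1
    · simp only [dif_pos h]
      exact ih (pvNext k).toNat (hm ▸ pvNext_lt h) (pvNext k) (c + 1) rfl
    · simp only [dif_neg h]; ring

-- A's value depends only on k and equals B's loop started at 1 (for 0 ≤ k)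
theorem pvA_eq_loop_aux (m : Nat) : ∀ (k n s : Int), 0 ≤ k → k.toNat = m →
    alsoSixAndFourAndNinePower n k s = pvStepLoop k 1 := by
  induction m using Nat.strong_induction_on with
  | _ m ih =>
    intro k n s hk hm
    by_cases hk0 : k = 0
    · subst hk0; rw [alsoSixAndFourAndNinePower, pvStepLoop]; norm_num
    by_cases hk1 : k = 1
    · subst hk1; rw [alsoSixAndFourAndNinePower, pvStepLoop]; norm_num
    have hk2 : 2 ≤ k := by omega
    -- B side: one loop iteration, then the counter lemma
    have hloop : pvStepLoop k 1 = 1 + pvStepLoop (pvNext k) 1 := by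
      rw [pvStepLoop, dif_pos (by omega : k > 1), pvStepLoop_succ]
    rw [hloop, alsoSixAndFourAndNinePower,
      if_neg hk0, if_neg hk1, if_neg (by omega : ¬ k < 0)]
    have step : ∀ k' n' s', pvNext k = k' → 0 ≤ k' →
        1 + alsoSixAndFourAndNinePower n' k' s' = 1 + pvStepLoop (pvNext k) 1 := by
      intro k' n' s' hnext hk'
      rw [hnext, ih k'.toNat (by rw [← hm, ← hnext]; exact pvNext_lt (by omega)) k' n' s' hk' rfl]
    by_cases h9 : PySem.Int.mod k 9 = 0
    · rw [if_pos h9]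
      exact step _ _ _ (by rw [pvNext, if_pos h9])
        (by rw [PySem.Int.floordiv_eq_ediv_of_pos (by norm_num)]; omega)
    rw [if_neg h9]
    by_cases h6 : PySem.Int.mod k 6 = 0
    · rw [if_pos h6]
      exact step _ _ _ (by rw [pvNext, if_neg h9, if_pos h6])
        (by rw [PySem.Int.floordiv_eq_ediv_of_pos (by norm_num)]; omega)
    rw [if_neg h6]
    by_cases h4 : PySem.Int.mod k 4 = 0
    · rw [if_pos h4]
      exact step _ _ _ (by rw [pvNext, if_neg h9, if_neg h6, if_pos h4])
        (by rw [PySem.Int.floordiv_eq_ediv_of_pos (by norm_num)]; omega)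
    rw [if_neg h4]
    by_cases h3 : PySem.Int.mod k 3 = 0
    · rw [if_pos h3]
      exact step _ _ _ (by rw [pvNext, if_neg h9, if_neg h6, if_neg h4, if_pos h3])
        (by rw [PySem.Int.floordiv_eq_ediv_of_pos (by norm_num)]; omega)
    rw [if_neg h3]
    by_cases h2 : PySem.Int.mod k 2 = 0
    · rw [if_pos h2]
      exact step _ _ _ (by rw [pvNext, if_neg h9, if_neg h6, if_neg h4, if_neg h3, if_pos h2])
        (by rw [PySem.Int.floordiv_eq_ediv_of_pos (by norm_num)]; omega)
    rw [if_neg h2]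
    -- here k is odd, so 'k % 2 == 1' holds and A takes the k-1 branch
    have hodd : PySem.Int.mod k 2 = 1 := by
      rw [PySem.Int.mod_eq_emod_of_pos (by norm_num)] at h2 ⊢; omega
    rw [if_pos (Or.inr hodd)]
    exact step _ _ _ (by rw [pvNext, if_neg h9, if_neg h6, if_neg h4, if_neg h3, if_neg h2])
      (by omega)

-- ===== VERDICT (by name: the statement is the Claim_ definition above) =====
theorem alsoSixAndFourAndNinePower_spec : Claim_equal_alsoSixAndFourAndNinePower := by
  intro n k s _ hk
  exact pvA_eq_loop_aux k.toNat k n s hk rfl
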